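-- pv_equiv track=rewrite | github.com/xshocuspocusxd/KsiegiWieczyste | kw_generate.py | validateKW
-- ===== SOURCE A (Python) =====
-- def validateKW(kw):
--     if kw is None or len(kw) != 15:
--         return False
--
--     kw = kw.upper()
--     letter_values = [
--         '0', '1', '2', '3', '4', '5', '6', '7', '8', '9', 'X',
--         'A', 'B', 'C', 'D', 'E', 'F', 'G', 'H', 'I', 'J',
--         'K', 'L', 'M', 'N', 'O', 'P', 'R', 'S', 'T', 'U',
--         'W', 'Y', 'Z'
--     ]
--
--     def get_letter_value(letter):
--         for j in range(len(letter_values)):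
--             if letter == letter_values[j]:
--                 return j
--         return -1
--
--     if kw[4] != '/' or kw[13] != '/':
--         return False
--
--     for i in range(2):
--         if get_letter_value(kw[i]) < 10:
--             return False
--
--     if get_letter_value(kw[2]) < 0 or get_letter_value(kw[2]) > 9:
--         return False
--
--     if get_letter_value(kw[3]) < 10:
--         return False
--
--     for i in range(5, 13):
--         if get_letter_value(kw[i]) < 0 or get_letter_value(kw[i]) > 9:
--             return False
--
--     sum = (1 * get_letter_value(kw[0]) +
--            3 * get_letter_value(kw[1]) +
--            7 * get_letter_value(kw[2]) +
--            1 * get_letter_value(kw[3]) +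
--            3 * get_letter_value(kw[5]) +
--            7 * get_letter_value(kw[6]) +
--            1 * get_letter_value(kw[7]) +
--            3 * get_letter_value(kw[8]) +
--            7 * get_letter_value(kw[9]) +
--            1 * get_letter_value(kw[10]) +
--            3 * get_letter_value(kw[11]) +
--            7 * get_letter_value(kw[12])) % 10
--
--     if kw[14] != str(sum):
--         return False
--
--     return True
-- ===== SOURCE B (Python) =====
-- def validateKW(kw):
--     if kw is None or len(kw) != 15:
--         return False
--     kw = kw.upper()
--     values = {c: v for v, c in enumerate('0123456789XABCDEFGHIJKLMNOPRSTUWYZ')}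
--     mask = 'LLDL/DDDDDDDD/C'
--     weights = (1, 3, 7, 1, 3, 7, 1, 3, 7, 1, 3, 7)
--     total = 0
--     w = 0
--     check = None
--     for ch, m in zip(kw, mask):
--         if m == '/':
--             if ch != '/':
--                 return False
--         elif m == 'C':
--             check = ch
--         else:
--             v = values.get(ch, -1)
--             if m == 'L' and v < 10:
--                 return False
--             if m == 'D' and not (0 <= v <= 9):
--                 return False
--             total += weights[w] * v
--             w += 1
--     return check == str(total % 10)
-- ===== Notes on version B (the rewrite author's own statement) =====
-- stated objective: simpler
-- what changed: A's five separate per-position checks, each scanning a 34-entry value list character by character, are replaced by one mask-driven pass over the zipped input that validates each position's class (letter, digit, slash, check digit) and accumulates the 1,3,7-cycled checksum from a value dict built once.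
import Mathlib
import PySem

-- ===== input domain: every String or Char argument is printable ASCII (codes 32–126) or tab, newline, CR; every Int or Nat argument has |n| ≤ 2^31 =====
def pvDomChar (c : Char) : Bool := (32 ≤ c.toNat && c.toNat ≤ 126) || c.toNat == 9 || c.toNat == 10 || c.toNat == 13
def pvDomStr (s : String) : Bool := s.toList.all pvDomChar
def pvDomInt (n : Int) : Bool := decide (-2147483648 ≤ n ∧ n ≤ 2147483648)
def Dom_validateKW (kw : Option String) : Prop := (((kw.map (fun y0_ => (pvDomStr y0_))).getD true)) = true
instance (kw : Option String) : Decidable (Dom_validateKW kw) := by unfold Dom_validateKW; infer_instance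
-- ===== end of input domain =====

-- B replaces A's per-position scans of a 34-entry table with one mask-driven pass using a dict of
-- character values built once (objective: simpler — a single loop instead of five separate checks).

-- ===== PORT A =====
def pvLetterValues : List Char :=
  ['0','1','2','3','4','5','6','7','8','9','X','A','B','C','D','E','F','G','H','I','J','K','L','M','N','O','P','R','S','T','U','W','Y','Z']

-- the inner 'for j in range(len(letter_values)): if letter == letter_values[j]: return j' loop
def pvGLVgo (letter : Char) (j : Int) : List Char → Int
  | [] => -1
  | c :: rest => if letter == c then j else pvGLVgo letter (j + 1) rest

def pvGetLetterValue (letter : Char) : Int := pvGLVgo letter 0 pvLetterValues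

def validateKW (kw : Option String) : Bool :=
  match kw with
  | none => false
  | some s =>
    if PySem.Str.len s ≠ 15 then false
    else
      let cs := PySem.Chars.upper s.toList
      let g : Int → Int := fun i => pvGetLetterValue (PySem.List.pyGetD cs i ' ')
      if PySem.List.pyGetD cs 4 ' ' != '/' || PySem.List.pyGetD cs 13 ' ' != '/' then false
      else if (PySem.List.pyRange 0 2 1).any (fun i => decide (g i < 10)) then false
      else if g 2 < 0 || 9 < g 2 then false
      else if g 3 < 10 then false
      else if (PySem.List.pyRange 5 13 1).any (fun i => decide (g i < 0) || decide (9 < g i)) then false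
      else
        let sum := PySem.Int.mod (1 * g 0 + 3 * g 1 + 7 * g 2 + 1 * g 3 +
          3 * g 5 + 7 * g 6 + 1 * g 7 + 3 * g 8 + 7 * g 9 + 1 * g 10 + 3 * g 11 + 7 * g 12) 10
        if [PySem.List.pyGetD cs 14 ' '] ≠ PySem.Int.toChars sum then false
        else true

-- ===== PORT B =====
-- values = {c: v for v, c in enumerate('0123456789XABCDEFGHIJKLMNOPRSTUWYZ')}
def pvValuesDict : PySem.Dict Char Int :=
  (PySem.List.enumerate "0123456789XABCDEFGHIJKLMNOPRSTUWYZ".toList 0).foldl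
    (fun d p => d.insert p.2 p.1) PySem.Dict.empty

def pvMask : List Char := "LLDL/DDDDDDDD/C".toList
def pvWeights : List Int := [1, 3, 7, 1, 3, 7, 1, 3, 7, 1, 3, 7]

-- the 'for ch, m in zip(kw, mask)' loop with state (total, w, check)
def pvBLoop : List (Char × Char) → Int → Int → Option Char → Bool
  | [], total, _, check =>
      match check with
      | some c => [c] == PySem.Int.toChars (PySem.Int.mod total 10)
      | none => false
  | (ch, m) :: rest, total, w, check =>
      if m == '/' then
        if ch != '/' then false else pvBLoop rest total w check
      else if m == 'C' then
        pvBLoop rest total w (some ch)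
      else
        let v := pvValuesDict.getD ch (-1)
        if m == 'L' && decide (v < 10) then false
        else if m == 'D' && !(decide (0 ≤ v) && decide (v ≤ 9)) then false
        else pvBLoop rest (total + PySem.List.pyGetD pvWeights w 0 * v) (w + 1) check

def validateKW_alt (kw : Option String) : Bool :=
  match kw with
  | none => false
  | some s =>
    if PySem.Str.len s ≠ 15 then false
    else pvBLoop ((PySem.Chars.upper s.toList).zip pvMask) 0 0 none

-- ===== PRECONDITION & SPEC =====
def Spec_validateKW (kw : Option String) (out : Bool) : Prop := out = validateKW_alt kw
instance (kw : Option String) (out : Bool) : Decidable (Spec_validateKW kw out) := by unfold Spec_validateKW; infer_instance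

-- ===== CLAIM (what is proved, stated in full; the proofs are below) =====
def Claim_equal_validateKW : Prop := ∀ (kw : Option String), Dom_validateKW kw → Spec_validateKW kw (validateKW kw)

-- ===== LEMMAS AND PROOFS =====

theorem pv_glv_eq (c : Char) : pvValuesDict.getD c (-1) = pvGetLetterValue c := by
  by_cases h0 : c = '0'
  · subst h0; decide
  by_cases h1 : c = '1'
  · subst h1; decide
  by_cases h2 : c = '2'
  · subst h2; decide
  by_cases h3 : c = '3'
  · subst h3; decide
  by_cases h4 : c = '4'
  · subst h4; decide
  by_cases h5 : c = '5'
  · subst h5; decide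
  by_cases h6 : c = '6'
  · subst h6; decide
  by_cases h7 : c = '7'
  · subst h7; decide
  by_cases h8 : c = '8'
  · subst h8; decide
  by_cases h9 : c = '9'
  · subst h9; decide
  by_cases h10 : c = 'X'
  · subst h10; decide
  by_cases h11 : c = 'A'
  · subst h11; decide
  by_cases h12 : c = 'B'
  · subst h12; decide
  by_cases h13 : c = 'C'
  · subst h13; decide
  by_cases h14 : c = 'D'
  · subst h14; decide
  by_cases h15 : c = 'E'
  · subst h15; decide
  by_cases h16 : c = 'F'
  · subst h16; decide
  by_cases h17 : c = 'G'
  · subst h17; decide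
  by_cases h18 : c = 'H'
  · subst h18; decide
  by_cases h19 : c = 'I'
  · subst h19; decide
  by_cases h20 : c = 'J'
  · subst h20; decide
  by_cases h21 : c = 'K'
  · subst h21; decide
  by_cases h22 : c = 'L'
  · subst h22; decide
  by_cases h23 : c = 'M'
  · subst h23; decide
  by_cases h24 : c = 'N'
  · subst h24; decide
  by_cases h25 : c = 'O'
  · subst h25; decide
  by_cases h26 : c = 'P'
  · subst h26; decide
  by_cases h27 : c = 'R'
  · subst h27; decide
  by_cases h28 : c = 'S'
  · subst h28; decide
  by_cases h29 : c = 'T'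
  · subst h29; decide
  by_cases h30 : c = 'U'
  · subst h30; decide
  by_cases h31 : c = 'W'
  · subst h31; decide
  by_cases h32 : c = 'Y'
  · subst h32; decide
  by_cases h33 : c = 'Z'
  · subst h33; decide
  simp [PySem.Dict.getD_eq_get?_getD, PySem.Dict.get?_insert_of_ne, PySem.Dict.get?_empty, pvGetLetterValue, pvGLVgo, pvLetterValues, pvValuesDict, PySem.List.enumerate,
        h0, h1, h2, h3, h4, h5, h6, h7, h8, h9, h10, h11, h12, h13, h14, h15, h16, h17, h18, h19, h20, h21, h22, h23, h24, h25, h26, h27, h28, h29, h30, h31, h32, h33, Ne.symm]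

set_option maxHeartbeats 1000000 in
theorem pv_main (s : String) : validateKW (some s) = validateKW_alt (some s) := by
  simp only [validateKW, validateKW_alt]
  by_cases hl : PySem.Str.len s = 15
  · simp only [hl, if_neg (by omega : ¬ (15 : Int) ≠ 15)]
    have hlen : s.toList.length = 15 := by
      have := PySem.Str.len_eq s; omega
    rcases hts : s.toList with _ | ⟨a0, _ | ⟨a1, _ | ⟨a2, _ | ⟨a3, _ | ⟨a4, _ | ⟨a5, _ | ⟨a6, _ | ⟨a7, _ | ⟨a8, _ | ⟨a9, _ | ⟨a10, _ | ⟨a11, _ | ⟨a12, _ | ⟨a13, _ | ⟨a14, _ | ⟨a15, t⟩⟩⟩⟩⟩⟩⟩⟩⟩⟩⟩⟩⟩⟩⟩⟩ <;>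
      simp only [hts, List.length] at hlen <;> try omega
    have hr1 : PySem.List.pyRange 0 2 1 = [0, 1] := by decide
    have hr2 : PySem.List.pyRange 5 13 1 = [5, 6, 7, 8, 9, 10, 11, 12] := by decide
    have hm : pvMask = ['L', 'L', 'D', 'L', '/', 'D', 'D', 'D', 'D', 'D', 'D', 'D', 'D', '/', 'C'] := by decide
    simp [hr1, hr2, hm, PySem.Chars.upper, PySem.List.pyGetD, PySem.List.pyGet?, PySem.List.pyIdx?,
      pvBLoop, pvWeights, pv_glv_eq]
    generalize pvGetLetterValue (PySem.Chars.upperChar a0) = v0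
    generalize pvGetLetterValue (PySem.Chars.upperChar a1) = v1
    generalize pvGetLetterValue (PySem.Chars.upperChar a2) = v2
    generalize pvGetLetterValue (PySem.Chars.upperChar a3) = v3
    generalize pvGetLetterValue (PySem.Chars.upperChar a5) = v5
    generalize pvGetLetterValue (PySem.Chars.upperChar a6) = v6
    generalize pvGetLetterValue (PySem.Chars.upperChar a7) = v7
    generalize pvGetLetterValue (PySem.Chars.upperChar a8) = v8
    generalize pvGetLetterValue (PySem.Chars.upperChar a9) = v9
    generalize pvGetLetterValue (PySem.Chars.upperChar a10) = v10
    generalize pvGetLetterValue (PySem.Chars.upperChar a11) = v11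
    generalize pvGetLetterValue (PySem.Chars.upperChar a12) = v12
    generalize PySem.Chars.upperChar a4 = u4
    generalize PySem.Chars.upperChar a13 = u13
    generalize PySem.Chars.upperChar a14 = u14
    rw [Bool.eq_iff_iff]
    simp only [Bool.and_eq_true, Bool.not_eq_eq_eq_not, Bool.not_true, decide_eq_true_eq,
      decide_eq_false_iff_not, beq_iff_eq]
    tauto
  · rw [if_pos hl, if_pos hl]

-- ===== VERDICT (by name: the statement is the Claim_ definition above) =====
theorem validateKW_spec : Claim_equal_validateKW := by
  intro kw _
  unfold Spec_validateKW
  cases kw with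
  | none => rfl
  | some s => exact pv_main s
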